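-- pv_equiv track=rewrite | github.com/pauloricca/Video-MIDI-trigger | video-midi-trigger.py | _resolve_camera
-- ===== SOURCE A (Python) =====
-- def _resolve_camera(cameras, camera_name):
--     if not cameras:
--         raise RuntimeError("No cameras found.")
--     if not camera_name:
--         return cameras[0]
--     match = None
--     for cam in cameras:
--         if cam["name"] == camera_name:
--             match = cam
--             break
--     if match is None:
--         for cam in cameras:
--             if cam["name"].lower() == camera_name.lower():
--                 match = cam
--                 break
--     if match is None:
--         available_names = [cam["name"] for cam in cameras]
--         raise ValueError(
--             f"Camera '{camera_name}' not found. "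
--             f"If this is a video file, check the path. "
--             f"Available cameras: {available_names}"
--         )
--     return match
-- ===== SOURCE B (Python) =====
-- def _resolve_camera(cameras, camera_name):
--     if not cameras:
--         raise RuntimeError("No cameras found.")
--     if not camera_name:
--         return cameras[0]
--     fallback = None
--     target_lower = camera_name.lower()
--     for cam in cameras:
--         name = cam["name"]
--         if name == camera_name:
--             return cam
--         if fallback is None and name.lower() == target_lower:
--             fallback = cam
--     if fallback is not None:
--         return fallback
--     available_names = [cam["name"] for cam in cameras]
--     raise ValueError(
--         f"Camera '{camera_name}' not found. "
--         f"If this is a video file, check the path. "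
--         f"Available cameras: {available_names}"
--     )
-- ===== Notes on version B (the rewrite author's own statement) =====
-- stated objective: alternative
-- what changed: Replaces A's two sequential full scans (exact pass, then case-insensitive pass) by one single pass that returns on an exact match and remembers the first case-insensitive match in a fallback variable.
import Mathlib
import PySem

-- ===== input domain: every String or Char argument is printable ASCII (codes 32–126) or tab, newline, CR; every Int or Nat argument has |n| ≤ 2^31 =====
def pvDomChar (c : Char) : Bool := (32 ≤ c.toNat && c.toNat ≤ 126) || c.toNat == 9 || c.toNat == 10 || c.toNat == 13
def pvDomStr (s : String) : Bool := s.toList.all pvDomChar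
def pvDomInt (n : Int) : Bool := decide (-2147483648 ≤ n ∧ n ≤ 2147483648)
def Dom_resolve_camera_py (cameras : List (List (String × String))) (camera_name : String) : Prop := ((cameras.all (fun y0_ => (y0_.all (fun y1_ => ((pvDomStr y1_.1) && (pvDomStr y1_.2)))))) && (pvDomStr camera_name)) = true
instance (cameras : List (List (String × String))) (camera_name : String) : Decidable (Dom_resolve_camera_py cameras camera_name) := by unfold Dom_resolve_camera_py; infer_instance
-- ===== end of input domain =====

-- B replaces A's two sequential scans (exact, then case-insensitive) by a single pass
-- keeping one fallback variable; same return value wherever A returns (alternative decomposition).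


-- cam["name"]: first-match lookup in the association list (outside Pre_ a missing key is a KeyError in Python; the port uses "" there, unclaimed)
def pvName (cam : List (String × String)) : String :=
  ((PySem.Dict.mk cam).get? "name").getD ""

-- ===== PORT A =====
-- first loop: break at first exact match; second loop (only if none): first case-insensitive match;
-- the raising paths (empty list / no match: RuntimeError / ValueError) return [] and are excluded by Pre_.
def resolve_camera_py (cameras : List (List (String × String))) (camera_name : String) : List (String × String) :=
  if cameras = [] then []
  else if camera_name = "" then cameras.headD []
  else
    let m1 := cameras.find? (fun cam => pvName cam = camera_name)
    let m2 := match m1 with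
      | some m => some m
      | none =>
          cameras.find? (fun cam => PySem.Str.lower (pvName cam) = PySem.Str.lower camera_name)
    match m2 with
    | some m => m
    | none => []

-- ===== PORT B =====
-- single pass: return on exact match, remember the first case-insensitive match as fallback.
def pvGoB (camera_name target_lower : String) :
    List (List (String × String)) → Option (List (String × String)) → List (String × String)
  | [], fallback => fallback.getD []
  | cam :: rest, fallback =>
      let name := pvName cam
      if name = camera_name then cam
      else if fallback = none ∧ PySem.Str.lower name = target_lower then
        pvGoB camera_name target_lower rest (some cam)
      else pvGoB camera_name target_lower rest fallback

def resolve_camera_py_alt (cameras : List (List (String × String))) (camera_name : String) : List (String × String) :=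
  if cameras = [] then []
  else if camera_name = "" then cameras.headD []
  else pvGoB camera_name (PySem.Str.lower camera_name) cameras none

-- ===== PRECONDITION & SPEC =====
-- Pre_ is exactly where A returns: a nonempty camera list and either an empty requested name, or
-- all cameras carry a "name" key and some name matches case-insensitively, or an exact match occurs
-- before any camera lacking a "name" key (otherwise A raises RuntimeError/KeyError/ValueError).
def Pre_resolve_camera_py (cameras : List (List (String × String))) (camera_name : String) : Prop :=
  cameras ≠ [] ∧
    (camera_name = "" ∨
      ((∀ cam ∈ cameras, ((PySem.Dict.mk cam).get? "name").isSome) ∧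
        ∃ cam ∈ cameras, PySem.Str.lower (pvName cam) = PySem.Str.lower camera_name) ∨
      (∃ cam ∈ cameras.takeWhile (fun c => ((PySem.Dict.mk c).get? "name").isSome),
        pvName cam = camera_name))
instance (cameras : List (List (String × String))) (camera_name : String) : Decidable (Pre_resolve_camera_py cameras camera_name) := by unfold Pre_resolve_camera_py; infer_instance

def pvWitness_resolve_camera_py : (List (List (String × String))) × String :=
  ([[("name", "Cam A"), ("id", "0")], [("name", "Cam B")]], "cam b")

def Spec_resolve_camera_py (cameras : List (List (String × String))) (camera_name : String) (out : List (String × String)) : Prop := out = resolve_camera_py_alt cameras camera_name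
instance (cameras : List (List (String × String))) (camera_name : String) (out : List (String × String)) : Decidable (Spec_resolve_camera_py cameras camera_name out) := by unfold Spec_resolve_camera_py; infer_instance

-- ===== CLAIM (what is proved, stated in full; the proofs are below) =====
def Claim_equal_resolve_camera_py : Prop := ∀ (cameras : List (List (String × String))) (camera_name : String), Dom_resolve_camera_py cameras camera_name → Pre_resolve_camera_py cameras camera_name → Spec_resolve_camera_py cameras camera_name (resolve_camera_py cameras camera_name)

-- ===== LEMMAS AND PROOFS =====

-- once a fallback is set, B's loop returns the first exact match, else the fallback
theorem pvGoB_some (camera_name target_lower : String) (f : List (String × String)) :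
    ∀ (cams : List (List (String × String))),
      pvGoB camera_name target_lower cams (some f)
        = (cams.find? (fun cam => pvName cam = camera_name)).getD f := by
  intro cams
  induction cams with
  | nil => simp [pvGoB]
  | cons cam rest ih =>
      simp only [pvGoB, List.find?_cons]
      by_cases h : pvName cam = camera_name <;> simp [h, ih]

-- with no fallback yet, B's loop returns the first exact match, else the first
-- case-insensitive match, else []
theorem pvGoB_none (camera_name : String) :
    ∀ (cams : List (List (String × String))),
      pvGoB camera_name (PySem.Str.lower camera_name) cams none
        = (match cams.find? (fun cam => pvName cam = camera_name) with
            | some m => some m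
            | none => cams.find?
                (fun cam => PySem.Str.lower (pvName cam) = PySem.Str.lower camera_name)).getD [] := by
  intro cams
  induction cams with
  | nil => simp [pvGoB]
  | cons cam rest ih =>
      simp only [pvGoB, List.find?_cons]
      by_cases h : pvName cam = camera_name
      · simp [h]
      · by_cases h2 : PySem.Str.lower (pvName cam) = PySem.Str.lower camera_name
        · simp only [h, h2]
          rw [pvGoB_some]
          cases hf : List.find? (fun cam => decide (pvName cam = camera_name)) rest <;> simp
        · simp [h, h2, ih]

-- the two ports agree on every input (Pre_ only excludes Python's raising paths)
theorem ports_eq (cameras : List (List (String × String))) (camera_name : String) :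
    resolve_camera_py cameras camera_name = resolve_camera_py_alt cameras camera_name := by
  unfold resolve_camera_py resolve_camera_py_alt
  by_cases h0 : cameras = []
  · simp [h0]
  · by_cases h1 : camera_name = ""
    · simp [h0, h1]
    · simp only [h0, h1, if_false]
      rw [pvGoB_none]
      cases h2 : (match List.find? (fun cam => decide (pvName cam = camera_name)) cameras with
          | some m => some m
          | none => List.find? (fun cam => decide (PySem.Str.lower (pvName cam) = PySem.Str.lower camera_name)) cameras) <;>
        simp

-- ===== VERDICT (by name: the statement is the Claim_ definition above) =====
theorem resolve_camera_py_spec : Claim_equal_resolve_camera_py := by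
  intro cameras camera_name _ _
  unfold Spec_resolve_camera_py
  exact ports_eq cameras camera_name
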